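-- pv_equiv track=rewrite | github.com/Apside-TOP/dynatrace_exporter | dynatrace_exporter.py | filter_dimensions
-- ===== SOURCE A (Python) =====
-- def filter_dimensions(properties: dict) -> dict:
--     result = dict()
--
--     suffix = '.name'
--     suffix_name_length = len(suffix)
--
--     for k, v in properties.items():
--         if not k.endswith('.name'):
--             result[k] = v
--         else:
--             without_suffix = k[0:-suffix_name_length]
--             if without_suffix not in properties or properties[without_suffix] != v:
--                 result[k] = v
--
--     return result
-- ===== SOURCE B (Python) =====
-- def filter_dimensions(properties: dict) -> dict:
--     # Build a full copy first, then delete each key base+'.name' that duplicates its base's value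
--     # (forward probing from the base keys: no suffix test, no slicing).
--     result = dict(properties)
--     for base, v in properties.items():
--         if properties.get(base + '.name') == v:
--             result.pop(base + '.name', None)
--     return result
-- ===== Notes on version B (the rewrite author's own statement) =====
-- stated objective: alternative
-- what changed: B copies the whole dict first and then deletes redundant keys found by forward probing (append '.name' to every base key and compare values), instead of A's single pass that suffix-tests each key, strips '.name', and inserts conditionally.
import Mathlib
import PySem

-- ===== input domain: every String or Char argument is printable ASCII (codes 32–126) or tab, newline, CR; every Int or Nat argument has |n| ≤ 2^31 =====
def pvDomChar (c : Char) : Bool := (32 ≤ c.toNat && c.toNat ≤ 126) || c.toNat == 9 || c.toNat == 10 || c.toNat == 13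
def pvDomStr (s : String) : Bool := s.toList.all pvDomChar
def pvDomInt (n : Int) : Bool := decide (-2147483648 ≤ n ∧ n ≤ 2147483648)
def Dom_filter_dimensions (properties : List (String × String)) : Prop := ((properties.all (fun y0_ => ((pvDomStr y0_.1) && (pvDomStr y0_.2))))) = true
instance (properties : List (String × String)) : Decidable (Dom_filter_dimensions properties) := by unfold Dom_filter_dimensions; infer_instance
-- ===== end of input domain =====

-- B copies the whole dict and then deletes redundant keys found by forward probing (append
-- '.name' to each base key and compare values) instead of A's suffix-test-strip-and-insert
-- single pass; same cost, different algorithmic direction.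

-- ===== PORT A =====
def filter_dimensions (properties : List (String × String)) : List (String × String) :=
  let suffix := ".name"
  let suffix_name_length := PySem.Str.len suffix
  let result := properties.foldl (fun result kv =>
    if !(PySem.Str.endswith kv.1 suffix) then
      PySem.Dict.insert result kv.1 kv.2
    else
      let without_suffix := PySem.Str.slice kv.1 (some 0) (some (-(suffix_name_length : Int)))
      if !(List.lookup without_suffix properties).isSome
          || !(List.lookup without_suffix properties == some kv.2) then
        PySem.Dict.insert result kv.1 kv.2
      else result) PySem.Dict.empty
  result.items

-- ===== PORT B =====
def filter_dimensions_alt (properties : List (String × String)) : List (String × String) :=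
  let result := PySem.Dict.ofList properties          -- result = dict(properties)
  (properties.foldl (fun d kv =>                      -- for base, v in properties.items():
    if List.lookup (kv.1 ++ ".name") properties == some kv.2   -- properties.get(base+'.name') == v
    then PySem.Dict.erase d (kv.1 ++ ".name")                  -- result.pop(base+'.name', None)
    else d) result).items

-- ===== PRECONDITION & SPEC =====
-- Pre_ requires pairwise-distinct keys: the assoc list encodes a Python dict, which cannot hold
-- duplicate keys, so this excludes no input the Python function ever receives.
def Pre_filter_dimensions (properties : List (String × String)) : Prop :=
  (properties.map Prod.fst).Nodup
instance (properties : List (String × String)) : Decidable (Pre_filter_dimensions properties) := by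
  unfold Pre_filter_dimensions; infer_instance

def pvWitness_filter_dimensions : (List (String × String)) :=
  [("host.name", "web1"), ("host", "web1"), ("zone.name", "eu"), ("cpu", "4")]

def Spec_filter_dimensions (properties : List (String × String)) (out : List (String × String)) : Prop := out = filter_dimensions_alt properties
instance (properties : List (String × String)) (out : List (String × String)) : Decidable (Spec_filter_dimensions properties out) := by unfold Spec_filter_dimensions; infer_instance

-- ===== CLAIM (what is proved, stated in full; the proofs are below) =====
def Claim_equal_filter_dimensions : Prop := ∀ (properties : List (String × String)), Dom_filter_dimensions properties → Pre_filter_dimensions properties → Spec_filter_dimensions properties (filter_dimensions properties)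

-- ===== LEMMAS AND PROOFS =====

-- the inline condition of A's loop, as a predicate (keep iff endswith fails or the base key is absent/different)
def pvKeepA (properties : List (String × String)) (kv : String × String) : Bool :=
  !(PySem.Str.endswith kv.1 ".name")
    || (!(List.lookup (PySem.Str.slice kv.1 (some 0) (some (-5))) properties).isSome
        || !(List.lookup (PySem.Str.slice kv.1 (some 0) (some (-5))) properties == some kv.2))

-- a conditional-insert loop over fresh distinct keys is a filter (used for A's loop)
lemma items_foldl_cond_insert (l : List (String × String)) (p : String × String → Bool)
    (d : PySem.Dict String String)
    (hf : ∀ kv ∈ l, PySem.Dict.contains d kv.1 = false)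
    (hn : (l.map Prod.fst).Nodup) :
    (l.foldl (fun d kv => if p kv then PySem.Dict.insert d kv.1 kv.2 else d) d).items
      = d.items ++ l.filter p := by
  induction l generalizing d with
  | nil => simp
  | cons kv t ih =>
    have hfresh : PySem.Dict.contains d kv.1 = false := hf kv (by simp)
    have hn' : (t.map Prod.fst).Nodup := (List.nodup_cons.mp hn).2
    have hne : ∀ kv' ∈ t, kv'.1 ≠ kv.1 := by
      intro kv' h' heq
      exact (List.nodup_cons.mp hn).1 (heq ▸ List.mem_map_of_mem h')
    by_cases hp : p kv = true
    · have hf' : ∀ kv' ∈ t, PySem.Dict.contains (PySem.Dict.insert d kv.1 kv.2) kv'.1 = false := by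
        intro kv' h'
        rw [PySem.Dict.contains_eq_isSome_get?, PySem.Dict.get?_insert_of_ne _ _ (hne kv' h')]
        rw [← PySem.Dict.contains_eq_isSome_get?]
        exact hf kv' (List.mem_cons_of_mem _ h')
      rw [List.foldl_cons, if_pos hp, ih _ hf' hn',
        PySem.Dict.items_insert_of_not_contains _ _ hfresh]
      simp [hp]
    · rw [List.foldl_cons, if_neg hp, ih _ (fun kv' h' => hf kv' (List.mem_cons_of_mem _ h')) hn']
      simp [hp]

lemma filter_dimensions_eq_filter (properties : List (String × String))
    (hpre : (properties.map Prod.fst).Nodup) :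
    filter_dimensions properties = properties.filter (pvKeepA properties) := by
  have h5 : PySem.Str.len ".name" = 5 := by decide
  unfold filter_dimensions
  simp only [h5]
  rw [show (fun (result : PySem.Dict String String) (kv : String × String) =>
      if !(PySem.Str.endswith kv.1 ".name") then PySem.Dict.insert result kv.1 kv.2
      else
        if !(List.lookup (PySem.Str.slice kv.1 (some 0) (some (-5 : Int))) properties).isSome
            || !(List.lookup (PySem.Str.slice kv.1 (some 0) (some (-5 : Int))) properties == some kv.2) then
          PySem.Dict.insert result kv.1 kv.2
        else result)
    = (fun result kv => if pvKeepA properties kv then PySem.Dict.insert result kv.1 kv.2 else result) from by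
      funext result kv
      unfold pvKeepA
      cases h : PySem.Str.endswith kv.1 ".name" <;>
        simp only [Bool.not_true, Bool.not_false, Bool.false_or, Bool.true_or] <;> simp]
  rw [items_foldl_cond_insert _ _ _ (by intro kv _; exact PySem.Dict.contains_empty _) hpre]
  simp [PySem.Dict.empty]

-- first-match lookup on a nodup-keyed assoc list is membership
lemma pv_lookup_iff_mem {l : List (String × String)} (hn : (l.map Prod.fst).Nodup)
    (k : String) (v : String) : List.lookup k l = some v ↔ (k, v) ∈ l := by
  induction l with
  | nil => simp
  | cons kv t ih =>
    obtain ⟨k1, v1⟩ := kv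
    have hn' := List.nodup_cons.mp hn
    by_cases hk : k1 = k
    · subst hk
      simp only [List.lookup, BEq.rfl, List.mem_cons, Prod.mk.injEq]
      constructor
      · rintro h; injection h with h; simp [h]
      · rintro (⟨_, rfl⟩ | h)
        · rfl
        · exact absurd (List.mem_map_of_mem (f := Prod.fst) h) hn'.1
    · have : List.lookup k ((k1, v1) :: t) = List.lookup k t := by
        simp only [List.lookup]
        rw [show (k == k1) = false from by simpa using fun h => hk h.symm]
      rw [this, ih hn'.2]
      simp only [List.mem_cons, Prod.mk.injEq]
      constructor
      · exact Or.inr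
      · rintro (⟨h, _⟩ | h)
        · exact absurd h.symm hk
        · exact h

lemma pv_lookup_self {l : List (String × String)} (hn : (l.map Prod.fst).Nodup)
    {kv : String × String} (h : kv ∈ l) : List.lookup kv.1 l = some kv.2 :=
  (pv_lookup_iff_mem hn kv.1 kv.2).mpr (by simpa using h)

-- erase is a filter on the items list
lemma pv_items_erase (d : PySem.Dict String String) (k : String) :
    (PySem.Dict.erase d k).items = d.items.filter (fun p => !(p.1 == k)) := rfl

-- a conditional-erase loop is a filter of "not hit by any erase"
lemma items_foldl_cond_erase (l : List (String × String)) (q : String × String → Bool)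
    (f : String × String → String) (d : PySem.Dict String String) :
    (l.foldl (fun d kv => if q kv then PySem.Dict.erase d (f kv) else d) d).items
      = d.items.filter (fun p => !(l.any (fun kv => q kv && (f kv == p.1)))) := by
  induction l generalizing d with
  | nil => simp
  | cons kv t ih =>
    rw [List.foldl_cons]
    by_cases hq : q kv = true
    · rw [if_pos hq, ih, pv_items_erase, List.filter_filter]
      apply List.filter_congr
      intro p _
      simp only [List.any_cons, hq, Bool.true_and, Bool.not_or, Bool.and_comm]
      congr 1
      simp [eq_comm]
    · rw [if_neg hq, ih]
      apply List.filter_congr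
      intro p _
      simp [List.any_cons, hq]

-- the full-copy start: dict(properties) has exactly properties as items (keys are distinct)
lemma pv_items_ofList (l : List (String × String)) (hn : (l.map Prod.fst).Nodup) :
    (PySem.Dict.ofList l).items = l := by
  have := PySem.Dict.items_foldl_insert_fresh (l := l) (k := Prod.fst) (v := Prod.snd)
    (d := PySem.Dict.empty) (by intro a _; exact PySem.Dict.contains_empty _) hn
  simpa [PySem.Dict.ofList, PySem.Dict.update, PySem.Dict.empty] using this

-- key string algebra: splitting off the '.name' suffix
lemma pv_base_append (s : String) (h : PySem.Str.endswith s ".name" = true) :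
    (PySem.Str.slice s (some 0) (some (-5))) ++ ".name" = s := by
  have hsuf : ".name".toList <:+ s.toList := by
    have := PySem.Chars.endswith_iff (s := s.toList) (p := ".name".toList)
    simp only [PySem.Str.endswith] at h
    rw [← this]
    simpa using h
  obtain ⟨pre, hpre⟩ := hsuf
  apply String.toList_inj.mp
  rw [String.toList_append]
  have hslice : (PySem.Str.slice s (some 0) (some (-5))).toList = s.toList.take (s.toList.length - 5) := by
    rw [PySem.Str.toList_slice]
    simp only [PySem.Chars.slice_eq_listSlice, PySem.List.slice_zero_start]
    rw [PySem.List.slice_to_neg_ofNat _ 5 (by omega)]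
  rw [hslice, ← hpre]
  have hl : (pre ++ ".name".toList).length - 5 = pre.length := by simp
  rw [hl, List.take_left']
  rfl

lemma pv_not_endswith_of_no_suffix (s b : String) (h : PySem.Str.endswith s ".name" = false)
    (hb : b ++ ".name" = s) : False := by
  have : PySem.Str.endswith s ".name" = true := by
    simp only [PySem.Str.endswith]
    rw [PySem.Chars.endswith_iff]
    exact ⟨b.toList, by rw [← String.toList_append, hb]⟩
  rw [h] at this
  exact absurd this (by simp)

-- append of '.name' is injective on the base
lemma pv_append_name_inj {a b : String} (h : a ++ ".name" = b ++ ".name") : a = b := by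
  apply String.toList_inj.mp
  have := congrArg String.toList h
  rw [String.toList_append, String.toList_append] at this
  exact List.append_cancel_right this

-- pointwise: the any-test of B's delete loop is exactly the negation of A's keep-test
lemma pv_any_eq_not_keep (properties : List (String × String))
    (hpre : (properties.map Prod.fst).Nodup) (p : String × String) (hp : p ∈ properties) :
    (properties.any (fun kv =>
        (List.lookup (kv.1 ++ ".name") properties == some kv.2) && (kv.1 ++ ".name" == p.1)))
      = !(pvKeepA properties p) := by
  cases he : PySem.Str.endswith p.1 ".name" with
  | false =>
    have hkeep : pvKeepA properties p = true := by unfold pvKeepA; rw [he]; simp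
    rw [hkeep]
    simp only [Bool.not_true]
    rw [List.any_eq_false]
    intro kv _
    simp only [Bool.and_eq_true, beq_iff_eq, not_and]
    intro _ hb
    exact pv_not_endswith_of_no_suffix p.1 kv.1 he hb
  | true =>
    set base := PySem.Str.slice p.1 (some 0) (some (-5)) with hbase
    have hsplit : base ++ ".name" = p.1 := pv_base_append p.1 he
    have hkeep : (!(pvKeepA properties p))
        = (List.lookup base properties == some p.2) := by
      unfold pvKeepA
      rw [← hbase, he]
      cases hl : List.lookup base properties with
      | none => simp
      | some v => by_cases hv : v = p.2 <;> simp [hv]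
    rw [hkeep]
    cases hm : (List.lookup base properties == some p.2) with
    | true =>
      rw [List.any_eq_true]
      have hmem : (base, p.2) ∈ properties :=
        (pv_lookup_iff_mem hpre base p.2).mp (by simpa [beq_iff_eq] using hm)
      refine ⟨(base, p.2), hmem, ?_⟩
      simp only [Bool.and_eq_true, beq_iff_eq]
      exact ⟨by rw [hsplit]; exact pv_lookup_self hpre (by simpa using hp), hsplit⟩
    | false =>
      rw [List.any_eq_false]
      rintro kv hkv
      simp only [Bool.and_eq_true, beq_iff_eq, not_and]
      intro hlk hb
      have hbk : kv.1 = base := pv_append_name_inj (by rw [hb, ← hsplit])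
      have hlp : List.lookup p.1 properties = some p.2 := pv_lookup_self hpre (by simpa using hp)
      rw [hb, hlp] at hlk
      injection hlk with hv
      have : List.lookup base properties = some p.2 := by
        rw [← hbk, hv]
        exact pv_lookup_self hpre (by simpa using hkv)
      rw [this] at hm
      simp at hm

lemma filter_dimensions_alt_eq_filter (properties : List (String × String))
    (hpre : (properties.map Prod.fst).Nodup) :
    filter_dimensions_alt properties = properties.filter (pvKeepA properties) := by
  unfold filter_dimensions_alt
  rw [items_foldl_cond_erase properties
    (fun kv => List.lookup (kv.1 ++ ".name") properties == some kv.2)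
    (fun kv => kv.1 ++ ".name") (PySem.Dict.ofList properties)]
  rw [pv_items_ofList properties hpre]
  apply List.filter_congr
  intro p hp
  rw [pv_any_eq_not_keep properties hpre p hp]
  simp

-- ===== VERDICT (by name: the statement is the Claim_ definition above) =====
theorem filter_dimensions_spec : Claim_equal_filter_dimensions := by
  intro properties _ hpre
  unfold Spec_filter_dimensions
  rw [filter_dimensions_eq_filter properties hpre, filter_dimensions_alt_eq_filter properties hpre]
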